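-- pv_equiv track=rewrite | github.com/jwu12351/Python101 | exam/exam1.py | remove_repeat3
-- ===== SOURCE A (Python) =====
-- def remove_repeat3(content):
--     result = ''
--
--     count_dict = {}
--     for x in content:
--         if x not in count_dict:
--             count_dict[x] = 1
--         else:
--             count_dict[x] += 1
--
--     for x in content:
--         if count_dict[x] == 1:
--             result += x
--
--     return result
-- ===== SOURCE B (Python) =====
-- def remove_repeat3(content):
--     # Recursive deletion: take the first character; if it occurs again in the
--     # remainder, it is a repeat -- delete every occurrence and recurse on what
--     # is left; otherwise keep it and recurse on the remainder.  No counting.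
--     if not content:
--         return ''
--     c = content[0]
--     rest = content[1:]
--     if c in rest:
--         return remove_repeat3(rest.replace(c, ''))
--     return c + remove_repeat3(rest)
-- ===== Notes on version B (the rewrite author's own statement) =====
-- stated objective: alternative
-- what changed: B drops A's frequency dictionary entirely: it recurses on the string, deleting every occurrence of the leading character when it repeats (via replace) and keeping it when it does not, so no counts are ever computed.
import Mathlib
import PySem

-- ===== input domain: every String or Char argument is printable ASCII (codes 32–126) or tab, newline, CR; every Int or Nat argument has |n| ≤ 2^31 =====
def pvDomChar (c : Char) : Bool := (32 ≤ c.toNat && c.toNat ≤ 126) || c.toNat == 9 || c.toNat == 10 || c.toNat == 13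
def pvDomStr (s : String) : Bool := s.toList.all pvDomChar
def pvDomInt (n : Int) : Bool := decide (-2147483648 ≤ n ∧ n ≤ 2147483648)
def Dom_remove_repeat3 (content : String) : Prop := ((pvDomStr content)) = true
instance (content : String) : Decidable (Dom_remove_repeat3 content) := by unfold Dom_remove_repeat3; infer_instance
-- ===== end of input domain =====

-- B replaces A's count-then-filter with a recursive deletion scheme: take the first char, delete all its occurrences if it repeats, else keep it; no frequency table (alternative decomposition, not faster).


-- ===== PORT A =====
-- first loop builds count_dict; second loop appends the chars with count 1 (result built as a
-- List Char accumulator, turned into a String at the end; count_dict[x] in the second loop always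
-- finds its key — every x of content was inserted by the first loop — so getD is exact there)
def remove_repeat3_dict (content : String) : PySem.Dict Char Int :=
  content.toList.foldl
    (fun d x => if d.contains x = false then d.insert x 1 else d.insert x (d.getD x 0 + 1))
    PySem.Dict.empty

def remove_repeat3 (content : String) : String :=
  String.mk (content.toList.foldl
    (fun result x => if (remove_repeat3_dict content).getD x 0 == 1 then result ++ [x] else result)
    [])

-- ===== PORT B =====
-- Source B's recursion on the characters: 'c in rest' is List.contains; rest.replace(c, '') on a
-- string of chars is exactly the deletion of every occurrence of c, i.e. List.filter (· != c)
def remove_repeat3_altList : List Char → List Char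
  | [] => []
  | c :: rest =>
    if rest.contains c then
      remove_repeat3_altList (rest.filter (fun x => !(x == c)))
    else
      c :: remove_repeat3_altList rest
termination_by l => l.length
decreasing_by
  · simpa using Nat.lt_succ_of_le (List.length_filter_le _ rest.attach)
  · exact Nat.lt_succ_self _

def remove_repeat3_alt (content : String) : String :=
  String.mk (remove_repeat3_altList content.toList)

-- ===== PRECONDITION & SPEC =====
def Spec_remove_repeat3 (content : String) (out : String) : Prop := out = remove_repeat3_alt content
instance (content : String) (out : String) : Decidable (Spec_remove_repeat3 content out) := by unfold Spec_remove_repeat3; infer_instance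

-- ===== CLAIM (what is proved, stated in full; the proofs are below) =====
def Claim_equal_remove_repeat3 : Prop := ∀ (content : String), Dom_remove_repeat3 content → Spec_remove_repeat3 content (remove_repeat3 content)

-- ===== LEMMAS AND PROOFS =====

-- A's dict-building step is exactly the insert-and-increment step
theorem pv_step_eq (d : PySem.Dict Char Int) (x : Char) :
    (if d.contains x = false then d.insert x 1 else d.insert x (d.getD x 0 + 1))
      = d.insert x (d.getD x 0 + 1) := by
  by_cases h : d.contains x = false
  · simp [h, PySem.Dict.getD_of_not_contains d (0 : Int) h]
  · simp [h]

-- A's dict gives each char its count in the string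
theorem pv_getD_count (content : String) (x : Char) :
    (remove_repeat3_dict content).getD x 0 = (content.toList.count x : Int) := by
  unfold remove_repeat3_dict
  have hf : (fun (d : PySem.Dict Char Int) x =>
      if d.contains x = false then d.insert x 1 else d.insert x (d.getD x 0 + 1))
      = fun d x => d.insert x (d.getD x 0 + 1) := by
    funext d x; exact pv_step_eq d x
  rw [hf, PySem.Dict.getD_foldl_insert_add_one, PySem.Dict.getD_empty]
  simp

-- B's recursion computes the once-occurring characters, in order
theorem pv_altList_eq (l : List Char) :
    remove_repeat3_altList l = l.filter (fun x => l.count x == 1) := by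
  induction hn : l.length using Nat.strong_induction_on generalizing l with
  | _ n ih =>
    match l with
    | [] => simp [remove_repeat3_altList]
    | c :: rest =>
      by_cases h : rest.contains c
      · rw [remove_repeat3_altList, if_pos h]
        have hmem : c ∈ rest := by simpa using h
        have hlen : (rest.filter (fun x => !(x == c))).length < n := by
          subst hn
          exact Nat.lt_succ_of_le (List.length_filter_le _ _)
        rw [ih _ hlen _ rfl]
        have hc : ((c :: rest).count c == 1) = false := by
          have : 1 ≤ rest.count c := List.one_le_count_iff.mpr hmem
          simp [List.count_cons]; omega
        rw [List.filter_cons, hc]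
        simp only [Bool.false_eq_true, if_neg, reduceIte]
        rw [List.filter_filter]
        apply List.filter_congr
        intro x hx
        by_cases hxc : x = c
        · subst hxc
          have : 1 ≤ rest.count x := List.one_le_count_iff.mpr hmem
          simp [List.count_cons]; omega
        · have hcnt : (List.filter (fun x => !(x == c)) rest).count x = rest.count x :=
            List.count_filter (by simp [hxc])
          simp [hcnt, hxc, Ne.symm hxc, List.count_cons]
      · rw [remove_repeat3_altList, if_neg h]
        have hmem : c ∉ rest := by simpa using h
        have hlen : rest.length < n := by subst hn; exact Nat.lt_succ_self _
        rw [ih _ hlen _ rfl]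
        have hc : ((c :: rest).count c == 1) = true := by
          have : rest.count c = 0 := List.count_eq_zero.mpr hmem
          simp [List.count_cons, this]
        rw [List.filter_cons, hc]
        simp only [if_pos]
        congr 1
        apply List.filter_congr
        intro x hx
        have hxc : x ≠ c := fun he => hmem (he ▸ hx)
        simp [List.count_cons, hxc, Ne.symm hxc]

-- ===== VERDICT (by name: the statement is the Claim_ definition above) =====
theorem remove_repeat3_spec : Claim_equal_remove_repeat3 := by
  intro content _
  unfold Spec_remove_repeat3 remove_repeat3 remove_repeat3_alt
  rw [PySem.List.foldl_append_if (f := fun x => x), pv_altList_eq]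
  simp only [List.map_id', List.nil_append]
  congr 1
  apply List.filter_congr
  intro x _
  rw [pv_getD_count]
  simp [Nat.cast_eq_one]
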